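-- pv_equiv track=rewrite | github.com/bono039/algorithm-study | week6/BOJ_3085/사탕게임_강아현.py | candy_count
-- ===== SOURCE A (Python) =====
-- def candy_count(board):
--     candy = 0
--     # 가로
--     for i in range(len(board)):
--         candy_cnt = 1
--         candy_ = board[i][0]
--         for j in range(1,len(board)):
--             if board[i][j] == candy_:
--                 candy_cnt += 1
--             elif board[i][j] != candy_:
--                 if candy_cnt > candy: candy = candy_cnt
--                 candy_ = board[i][j]
--                 candy_cnt = 1
--         if candy_cnt > candy: candy = candy_cnt
--     # 세로
--     for i in range(len(board)):
--         candy_cnt = 1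
--         candy_ = board[0][i]
--         for j in range(1,len(board)):
--             if board[j][i] == candy_:
--                 candy_cnt += 1
--             elif board[j][i] != candy_:
--                 if candy_cnt > candy: candy = candy_cnt
--                 candy_ = board[j][i]
--                 candy_cnt = 1
--         if candy_cnt > candy: candy = candy_cnt
--     return candy
-- ===== SOURCE B (Python) =====
-- def _max_run(line):
--     if not line:
--         return 0
--     k = 1
--     while k < len(line) and line[k] == line[0]:
--         k += 1
--     return max(k, _max_run(line[k:]))
--
--
-- def candy_count(board):
--     n = len(board)
--     if n == 0:
--         return 0
--     rows = [row[:n] for row in board]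
--     cols = [list(col) for col in zip(*rows)]
--     return max(_max_run(line) for line in rows + cols)
-- ===== Notes on version B (the rewrite author's own statement) =====
-- stated objective: simpler
-- what changed: B replaces A's four index-driven loops with a global max of a per-line helper: it slices rows to n, transposes with zip(*), and computes each line's longest run by recursively stripping the maximal constant prefix, instead of A's streaming counter with a shared running maximum over manual row/column index arithmetic.
import Mathlib
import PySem

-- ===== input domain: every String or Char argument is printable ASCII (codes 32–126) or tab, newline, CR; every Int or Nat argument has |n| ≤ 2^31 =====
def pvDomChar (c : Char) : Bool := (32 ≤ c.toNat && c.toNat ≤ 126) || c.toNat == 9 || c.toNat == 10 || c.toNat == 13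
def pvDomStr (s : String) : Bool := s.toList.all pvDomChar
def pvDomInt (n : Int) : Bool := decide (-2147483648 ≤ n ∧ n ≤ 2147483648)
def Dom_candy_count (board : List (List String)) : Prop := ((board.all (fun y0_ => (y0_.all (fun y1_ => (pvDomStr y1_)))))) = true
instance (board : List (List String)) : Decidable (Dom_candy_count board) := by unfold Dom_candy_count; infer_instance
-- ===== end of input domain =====

-- B replaces A's four index-driven loops by max over per-line longest runs (recursive
-- prefix-stripping) on the sliced rows and the zip(*)-transposed columns; objective: simpler.

-- ===== PORT A =====
-- board[i][j]; Python raises where the index is out of range — those inputs are excluded by Pre_.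
def pvAt (board : List (List String)) (i j : Int) : String :=
  PySem.List.pyGetD (PySem.List.pyGetD board i []) j ""

-- the horizontal scan of A's first loop body, state (candy, candy_cnt, candy_)
def candy_aRow (board : List (List String)) (candy : Int) (i : Int) : Int :=
  let s := (PySem.List.pyRange 1 (board.length : Int)).foldl
    (fun (s : Int × Int × String) j =>
      if pvAt board i j = s.2.2 then (s.1, s.2.1 + 1, s.2.2)
      else (if s.2.1 > s.1 then s.2.1 else s.1, 1, pvAt board i j))
    (candy, 1, pvAt board i 0)
  if s.2.1 > s.1 then s.2.1 else s.1

-- the vertical scan of A's second loop body (A duplicates the code; so do we)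
def candy_aCol (board : List (List String)) (candy : Int) (i : Int) : Int :=
  let s := (PySem.List.pyRange 1 (board.length : Int)).foldl
    (fun (s : Int × Int × String) j =>
      if pvAt board j i = s.2.2 then (s.1, s.2.1 + 1, s.2.2)
      else (if s.2.1 > s.1 then s.2.1 else s.1, 1, pvAt board j i))
    (candy, 1, pvAt board 0 i)
  if s.2.1 > s.1 then s.2.1 else s.1

def candy_count (board : List (List String)) : Int :=
  let candy := (PySem.List.pyRange 0 (board.length : Int)).foldl (candy_aRow board) 0
  (PySem.List.pyRange 0 (board.length : Int)).foldl (candy_aCol board) candy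

-- ===== PORT B =====
-- _max_run: k counts the while loop (maximal prefix equal to line[0]), then recurse on line[k:]
-- structural recursion on a fuel = the length of the original line (the recursion is on line[k:],
-- a strict suffix, so the fuel never runs out; kept structural so that the kernel evaluates it)
def maxRunF : Nat → List String → Int
  | fuel + 1, a :: l =>
    let t := (l.takeWhile (· == a)).length   -- the while loop: k = 1 + t
    max ((1 + t : Nat) : Int) (maxRunF fuel (l.drop t))   -- line[k:] = l.drop t
  | _, _ => 0

def maxRun (line : List String) : Int := maxRunF line.length line

-- cols = [list(col) for col in zip(*rows)]
def zipStar (rows : List (List String)) : List (List String) :=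
  let m := ((rows.map List.length).min?).getD 0
  (List.range m).map (fun j => rows.map (fun r => r.getD j ""))

def candy_count_alt (board : List (List String)) : Int :=
  if board.length = 0 then 0
  else
    let rows := board.map (fun r => r.take board.length)
    let cols := zipStar rows
    (PySem.List.max? ((rows ++ cols).map maxRun) (fun v => v)).getD 0

-- ===== PRECONDITION & SPEC =====
-- A indexes every row at columns 0..len(board)-1; on a non-empty board with a row shorter
-- than len(board) it raises IndexError — exactly those inputs are excluded.
def Pre_candy_count (board : List (List String)) : Prop :=
  ∀ row ∈ board, board.length ≤ row.length
instance (board : List (List String)) : Decidable (Pre_candy_count board) := by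
  unfold Pre_candy_count; infer_instance
def pvWitness_candy_count : List (List String) := [["a", "b"], ["b", "b"]]

def Spec_candy_count (board : List (List String)) (out : Int) : Prop := out = candy_count_alt board
instance (board : List (List String)) (out : Int) : Decidable (Spec_candy_count board out) := by unfold Spec_candy_count; infer_instance

-- ===== CLAIM (what is proved, stated in full; the proofs are below) =====
def Claim_equal_candy_count : Prop := ∀ (board : List (List String)), Dom_candy_count board → Pre_candy_count board → Spec_candy_count board (candy_count board)

-- ===== LEMMAS AND PROOFS =====

-- A's inner-loop step, on the element rather than the index
def aStep (s : Int × Int × String) (y : String) : Int × Int × String :=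
  if y = s.2.2 then (s.1, s.2.1 + 1, s.2.2)
  else (if s.2.1 > s.1 then s.2.1 else s.1, 1, y)

-- reference: longest run seen so far, with a run of `a` of length `k` still open
def runMaxFrom (a : String) (k : Int) : List String → Int
  | [] => k
  | b :: l => if b = a then runMaxFrom a (k + 1) l else max k (runMaxFrom b 1 l)

theorem maxRunF_eq : ∀ (f1 : Nat), ∀ (f2 : Nat) (l : List String), l.length ≤ f1 → l.length ≤ f2 →
    maxRunF f1 l = maxRunF f2 l := by
  intro f1
  induction f1 with
  | zero =>
    intro f2 l h1 _
    have : l = [] := List.eq_nil_of_length_eq_zero (Nat.le_zero.mp h1)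
    subst this
    cases f2 <;> rfl
  | succ f ih =>
    intro f2 l h1 h2
    cases l with
    | nil => cases f2 <;> rfl
    | cons a l =>
      cases f2 with
      | zero => simp at h2
      | succ f2 =>
        simp only [maxRunF]
        congr 1
        apply ih
        · have := (List.takeWhile_sublist (· == a) (l := l)).length_le
          simp at h1 ⊢; omega
        · simp at h2 ⊢; omega

theorem maxRun_cons (a : String) (l : List String) :
    maxRun (a :: l) = max (((1 + (l.takeWhile (· == a)).length : Nat)) : Int)
      (maxRun (l.drop (l.takeWhile (· == a)).length)) := by
  show maxRunF (l.length + 1) (a :: l) = _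
  simp only [maxRunF]
  congr 1
  apply maxRunF_eq <;> simp

theorem maxRun_nonneg (l : List String) : 0 ≤ maxRun l := by
  suffices h : ∀ f l, 0 ≤ maxRunF f l from h _ _
  intro f
  induction f with
  | zero => intro l; cases l <;> simp [maxRunF]
  | succ f ih => intro l; cases l with
    | nil => simp [maxRunF]
    | cons a l => simp only [maxRunF]; positivity

theorem foldl_max_opt : ∀ (xs : List Int) (m : Int),
    List.foldl (fun acc y => match acc with
      | none => some y
      | some m => if m < y then some y else some m) (some m) xs
      = some (xs.foldl max m) := by
  intro xs
  induction xs with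
  | nil => intro m; rfl
  | cons y ys ih =>
    intro m
    simp only [List.foldl_cons]
    rw [show (if m < y then some y else some m) = some (max m y) by
      rcases le_or_gt y m with h | h
      · simp [not_lt.mpr h, max_eq_left h]
      · simp [h, max_eq_right h.le]]
    exact ih (max m y)

theorem max?_cons_int (x : Int) (xs : List Int) :
    PySem.List.max? (x :: xs) (fun v => v) = some (xs.foldl max x) := by
  have h := foldl_max_opt xs x
  simp only [PySem.List.max?, List.foldl_cons]
  convert h using 2
  funext acc y
  cases acc <;> rfl

theorem scanA_eq (l : List String) : ∀ (c k : Int) (a : String),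
    (let s := l.foldl aStep (c, k, a); if s.2.1 > s.1 then s.2.1 else s.1)
      = max c (runMaxFrom a k l) := by
  induction l with
  | nil =>
    intro c k a
    simp only [List.foldl_nil, runMaxFrom]
    rcases le_or_gt k c with h | h
    · simp [not_lt.mpr h, max_eq_left h]
    · simp [h, max_eq_right h.le]
  | cons b l ih =>
    intro c k a
    simp only [List.foldl_cons, runMaxFrom]
    by_cases hb : b = a
    · simp only [aStep, hb]
      exact ih c (k + 1) a
    · simp only [aStep, if_neg hb]
      rw [show (if k > c then k else c) = max c k by
        rcases le_or_gt k c with h | h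
        · simp [not_lt.mpr h, max_eq_left h]
        · simp [h, max_eq_right h.le]]
      rw [ih (max c k) 1 b, max_assoc]

theorem runMaxFrom_eq (l : List String) : ∀ (a : String) (k : Int), 1 ≤ k →
    runMaxFrom a k l
      = max (k + ((l.takeWhile (· == a)).length : Int)) (maxRun (l.drop (l.takeWhile (· == a)).length)) := by
  induction l with
  | nil =>
    intro a k hk
    simp only [runMaxFrom, List.takeWhile_nil, List.length_nil, List.drop_nil]
    have h0 : maxRun [] = 0 := rfl
    rw [h0]
    push_cast
    omega
  | cons b l ih =>
    intro a k hk
    by_cases hb : b = a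
    · subst hb
      simp only [runMaxFrom, List.takeWhile_cons, beq_self_eq_true, if_pos]
      simp only [List.length_cons, List.drop_succ_cons]
      rw [ih b (k + 1) (by omega)]
      congr 1
      push_cast
      ring
    · have hbeq : (b == a) = false := beq_eq_false_iff_ne.mpr hb
      simp only [runMaxFrom, if_neg hb, List.takeWhile_cons, hbeq]
      simp only [Bool.false_eq_true, if_false, List.length_nil, List.drop_zero]
      rw [maxRun_cons b l, ih b 1 le_rfl]
      push_cast
      simp

theorem maxRun_eq_runMaxFrom (a : String) (l : List String) :
    maxRun (a :: l) = runMaxFrom a 1 l := by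
  rw [maxRun_cons, runMaxFrom_eq l a 1 le_rfl]
  push_cast
  simp

theorem foldl_pyRange_to_list {σ α : Type} (F : σ → Int → σ) (G : σ → α → σ) :
    ∀ (l : List α) (k : Nat), (∀ (t : Nat) (h : t < l.length) (s : σ), F s ((k + t : Nat) : Int) = G s l[t]) →
    ∀ s : σ, (PySem.List.pyRange (k : Int) ((k + l.length : Nat) : Int)).foldl F s = l.foldl G s := by
  intro l
  induction l with
  | nil =>
    intro k _ s
    simp only [List.length_nil, Nat.add_zero, List.foldl_nil]
    rw [PySem.List.pyRange_one_eq_nil le_rfl]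
    rfl
  | cons x xs ih =>
    intro k hp s
    rw [PySem.List.pyRange_one_cons (by norm_cast; simp)]
    simp only [List.foldl_cons]
    have h0 : F s (k : Int) = G s x := by
      have := hp 0 (by simp) s
      simpa using this
    rw [h0]
    have hrec := ih (k + 1) (fun t ht s => by
      have := hp (t + 1) (by simpa using Nat.succ_lt_succ ht) s
      simpa [Nat.add_assoc, Nat.add_comm 1 t] using this) (G s x)
    rw [show ((k : Int) + 1) = ((k + 1 : Nat) : Int) by push_cast; ring,
        show ((k + (x :: xs).length : Nat) : Int) = (((k + 1) + xs.length : Nat) : Int) by push_cast; simp; ring]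
    exact hrec

theorem foldl_pyRange_zero {σ α : Type} (F : σ → Int → σ) (G : σ → α → σ) (l : List α)
    (h : ∀ (t : Nat) (ht : t < l.length) (s : σ), F s (t : Int) = G s l[t]) (s : σ) :
    (PySem.List.pyRange 0 (l.length : Int)).foldl F s = l.foldl G s := by
  have := foldl_pyRange_to_list F G l 0 (fun t ht s => by simpa using h t ht s) s
  simpa using this

theorem foldl_pyRange_one {σ α : Type} (F : σ → Int → σ) (G : σ → α → σ) (l : List α)
    (h : ∀ (t : Nat) (ht : t < l.length) (s : σ), F s ((1 + t : Nat) : Int) = G s l[t]) (s : σ) :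
    (PySem.List.pyRange 1 ((1 + l.length : Nat) : Int)).foldl F s = l.foldl G s := by
  have := foldl_pyRange_to_list F G l 1 h s
  simpa using this

-- one line of A's scan (either orientation), as a fold over the line's elements
theorem scan_line (g : Int → String) (ln : List String) (c : Int)
    (hne : ln ≠ [])
    (hg : ∀ (t : Nat) (ht : t < ln.length), g (t : Int) = ln[t]) :
    (let s := (PySem.List.pyRange 1 (ln.length : Int)).foldl (fun s j => aStep s (g j)) (c, 1, g 0)
     if s.2.1 > s.1 then s.2.1 else s.1) = max c (maxRun ln) := by
  obtain ⟨a, l, rfl⟩ : ∃ a l, ln = a :: l := by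
    cases ln with
    | nil => exact absurd rfl hne
    | cons a l => exact ⟨a, l, rfl⟩
  have h0 : g 0 = a := by
    have := hg 0 (by simp)
    simpa using this
  have hlen : ((a :: l).length : Int) = ((1 + l.length : Nat) : Int) := by push_cast; simp; ring
  rw [hlen, h0]
  have hfold := foldl_pyRange_one (fun s j => aStep s (g j)) aStep l
    (fun t ht s => by
      have hidx : (1 + t) < (a :: l).length := by simp; omega
      have hgt := hg (1 + t) hidx
      have h2 : (a :: l)[1 + t]'hidx = l[t] := by
        simp [Nat.add_comm 1 t]
      simp only []
      rw [hgt, h2]) (c, 1, a)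
  rw [hfold, scanA_eq l c 1 a, maxRun_eq_runMaxFrom]

theorem foldl_min_const (n : Nat) : ∀ l : List Nat, (∀ x ∈ l, x = n) → l.foldl min n = n := by
  intro l
  induction l with
  | nil => intro _; rfl
  | cons x xs ih =>
    intro h
    have hx : x = n := h x (by simp)
    simp only [List.foldl_cons, hx, min_self]
    exact ih (fun y hy => h y (by simp [hy]))

theorem candy_count_spec_aux (board : List (List String)) (h : Pre_candy_count board) :
    candy_count board = candy_count_alt board := by
  by_cases hz : board.length = 0
  · have hb : board = [] := List.eq_nil_of_length_eq_zero hz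
    subst hb; decide
  · have hlen : ∀ row ∈ board, board.length ≤ row.length := h
    set n := board.length with hn
    set rows := board.map (fun r => r.take n) with hrows
    set cols := (List.range n).map (fun j => rows.map (fun r => r.getD j "")) with hcols
    have hrl : rows.length = n := by simp [hrows, ← hn]
    have hcl : cols.length = n := by simp [hcols]
    have hrowlen : ∀ (t : Nat) (ht : t < n), n ≤ (board[t]'ht).length :=
      fun t ht => hlen _ (board.getElem_mem ht)
    have hrget : ∀ (t : Nat) (ht : t < rows.length), rows[t] = (board[t]'(by omega)).take n := by
      intro t ht
      simp [hrows]
    have htakelen : ∀ (t : Nat) (ht : t < n), ((board[t]'ht).take n).length = n := by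
      intro t ht
      rw [List.length_take]
      exact min_eq_left (hrowlen t ht)
    have hcget : ∀ (t : Nat) (ht : t < cols.length), cols[t] = rows.map (fun r => r.getD t "") := by
      intro t ht
      simp [hcols]
    -- the entry board[s][t] both as A reads it and as B's sliced rows hold it
    have hentry : ∀ (s t : Nat) (hs : s < n) (htn : t < n),
        pvAt board (s : Int) (t : Int) = (board[s]'hs)[t]'(by have := hrowlen s hs; omega) := by
      intro s t hs htn
      have hsb : s < board.length := hs
      have htb : t < (board[s]'hs).length := by have := hrowlen s hs; omega
      simp only [pvAt, PySem.List.pyGetD_natCast]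
      rw [List.getD_eq_getElem board [] hsb, List.getD_eq_getElem _ "" htb]
    have htakeget : ∀ (s t : Nat) (hs : s < n) (htn : t < n),
        ((board[s]'hs).take n)[t]'(by rw [htakelen s hs]; omega)
          = (board[s]'hs)[t]'(by have := hrowlen s hs; omega) := by
      intro s t hs htn
      exact List.getElem_take
    -- A's horizontal loop body, per row
    have hRow : ∀ (t : Nat) (ht : t < rows.length) (c : Int),
        candy_aRow board c (t : Int) = max c (maxRun rows[t]) := by
      intro t ht c
      have ht' : t < n := by omega
      have hlr : (rows[t]'ht).length = n := by rw [hrget t ht]; exact htakelen t ht'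
      have hne : rows[t]'ht ≠ [] := by
        intro e
        rw [e] at hlr
        simp at hlr
        omega
      have hg : ∀ (s : Nat) (hs : s < (rows[t]'ht).length),
          pvAt board (t : Int) (s : Int) = (rows[t]'ht)[s] := by
        intro s hs
        have hsn : s < n := by omega
        rw [hentry t s ht' hsn]
        have he1 : (rows[t]'ht)[s]'hs = ((board[t]'ht').take n)[s]'(by rw [htakelen t ht']; omega) := by
          congr 1
          exact hrget t ht
        rw [he1, htakeget t s ht' hsn]
      have hsl := scan_line (fun j => pvAt board (t : Int) j) (rows[t]'ht) c hne hg
      rw [hlr] at hsl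
      exact hsl
    -- A's vertical loop body, per column
    have hCol : ∀ (t : Nat) (ht : t < cols.length) (c : Int),
        candy_aCol board c (t : Int) = max c (maxRun cols[t]) := by
      intro t ht c
      have ht' : t < n := by omega
      have hlc : (cols[t]'ht).length = n := by rw [hcget t ht]; simp [← hrl]
      have hne : cols[t]'ht ≠ [] := by
        intro e
        rw [e] at hlc
        simp at hlc
        omega
      have hg : ∀ (s : Nat) (hs : s < (cols[t]'ht).length),
          pvAt board (s : Int) (t : Int) = (cols[t]'ht)[s] := by
        intro s hs
        have hsn : s < n := by omega
        rw [hentry s t hsn ht']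
        have h1 : (cols[t]'ht)[s]'hs = (rows[s]'(by omega)).getD t "" := by
          have h2 : (cols[t]'ht)[s]'hs = (rows.map (fun r => r.getD t ""))[s]'(by simp; omega) := by
            congr 1
            exact hcget t ht
          rw [h2]
          simp
        rw [h1, hrget s (by omega)]
        have hgd : ((board[s]'hsn).take n).getD t "" = ((board[s]'hsn).take n)[t]'(by rw [htakelen s hsn]; omega) :=
          List.getD_eq_getElem _ "" (by rw [htakelen s hsn]; omega)
        rw [hgd, htakeget s t hsn ht']
      have hsl := scan_line (fun j => pvAt board j (t : Int)) (cols[t]'ht) c hne hg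
      rw [hlc] at hsl
      exact hsl
    -- A = fold of max∘maxRun over rows ++ cols
    have hA : candy_count board = (rows ++ cols).foldl (fun c ln => max c (maxRun ln)) 0 := by
      show (PySem.List.pyRange 0 (board.length : Int)).foldl (candy_aCol board)
        ((PySem.List.pyRange 0 (board.length : Int)).foldl (candy_aRow board) 0) = _
      rw [show ((board.length : Nat) : Int) = ((rows.length : Nat) : Int) by rw [hrl, hn]]
      rw [foldl_pyRange_zero (candy_aRow board) (fun c ln => max c (maxRun ln)) rows
        (fun t ht s => hRow t ht s)]
      rw [show ((rows.length : Nat) : Int) = ((cols.length : Nat) : Int) by rw [hrl, hcl]]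
      rw [foldl_pyRange_zero (candy_aCol board) (fun c ln => max c (maxRun ln)) cols
        (fun t ht s => hCol t ht s)]
      rw [List.foldl_append]
    -- B = max? of maxRun over the same lines
    have hmin : ((rows.map List.length).min?).getD 0 = n := by
      have hall : ∀ x ∈ rows.map List.length, x = n := by
        intro x hx
        rw [List.mem_map] at hx
        obtain ⟨r, hr, rfl⟩ := hx
        rw [hrows, List.mem_map] at hr
        obtain ⟨r0, hr0, rfl⟩ := hr
        rw [List.length_take]
        exact min_eq_left (hlen r0 hr0)
      cases he : rows.map List.length with
      | nil =>
        have hre : rows = [] := by simpa using he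
        rw [hre] at hrl
        simp at hrl
        omega
      | cons x xs =>
        rw [he] at hall
        have hx : x = n := hall x (by simp)
        rw [List.min?_cons', hx, foldl_min_const n xs (fun y hy => hall y (by simp [hy]))]
        rfl
    have hB : candy_count_alt board
        = (PySem.List.max? ((rows ++ cols).map maxRun) (fun v => v)).getD 0 := by
      rw [candy_count_alt, if_neg (by omega)]
      show (PySem.List.max? ((rows ++ zipStar rows).map maxRun) (fun v => v)).getD 0 = _
      rw [show zipStar rows = cols by rw [zipStar]; rw [hmin]]
    -- stitch the two together
    rw [hA, hB]
    obtain ⟨ln0, rest, hsplit⟩ : ∃ ln0 rest, rows ++ cols = ln0 :: rest := by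
      cases he : rows ++ cols with
      | nil =>
        have hre : rows = [] := by
          cases hr2 : rows with
          | nil => rfl
          | cons a l => rw [hr2] at he; simp at he
        rw [hre] at hrl
        simp at hrl
        omega
      | cons a l => exact ⟨a, l, rfl⟩
    rw [hsplit]
    rw [← List.foldl_map]
    rw [List.map_cons, List.foldl_cons, max_eq_right (maxRun_nonneg ln0)]
    rw [max?_cons_int]
    rfl

-- ===== VERDICT (by name: the statement is the Claim_ definition above) =====
theorem candy_count_spec : Claim_equal_candy_count := by
  intro board _ hpre
  exact candy_count_spec_aux board hpre
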